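-- pv_equiv track=rewrite | github.com/kgirtz/AdventOfCode | AoC2019/Day 18/Day 18.py | parse
-- ===== SOURCE A (Python) =====
-- from typing import NamedTuple, Iterable, Union
--
-- class Point(NamedTuple):
--     x: int = -1
--     y: int = -1
--
-- def parse(puzzle_input):
--     """Parse input"""
--     passages: set[Point] = set()
--     keys: dict[str, Point] = {}
--     doors: dict[str, Point] = {}
--     entrance: Point = Point(-1, -1)
--
--     for y, line in enumerate(puzzle_input.split('\n')):
--         for x, ch in enumerate(line):
--             if ch == '#':
--                 continue
--
--             pos: Point = Point(x, y)
--             passages.add(pos)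
--
--             if ch == '@':
--                 entrance = pos
--             elif ch.islower():
--                 keys[ch] = pos
--             elif ch.isupper():
--                 doors[ch] = pos
--
--     return entrance, passages, keys, doors
-- ===== SOURCE B (Python) =====
-- from typing import NamedTuple
--
-- class Point(NamedTuple):
--     x: int = -1
--     y: int = -1
--
-- def parse(puzzle_input):
--     """Parse input (four independent passes over the grid cells)"""
--     cells = [(x, y, ch)
--              for y, line in enumerate(puzzle_input.split('\n'))
--              for x, ch in enumerate(line)]
--
--     passages = {Point(x, y) for x, y, ch in cells if ch != '#'}
--     keys = {ch: Point(x, y) for x, y, ch in cells if ch.islower()}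
--     doors = {ch: Point(x, y) for x, y, ch in cells if ch.isupper()}
--     ats = [Point(x, y) for x, y, ch in cells if ch == '@']
--     entrance = ats[-1] if ats else Point(-1, -1)
--
--     return entrance, passages, keys, doors
-- ===== Notes on version B (the rewrite author's own statement) =====
-- stated objective: idiomatic
-- what changed: A's single nested loop threading four accumulators is replaced by one flat cell list and four independent comprehension passes (set, two dict comprehensions, last-'@' scan).
import Mathlib
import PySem

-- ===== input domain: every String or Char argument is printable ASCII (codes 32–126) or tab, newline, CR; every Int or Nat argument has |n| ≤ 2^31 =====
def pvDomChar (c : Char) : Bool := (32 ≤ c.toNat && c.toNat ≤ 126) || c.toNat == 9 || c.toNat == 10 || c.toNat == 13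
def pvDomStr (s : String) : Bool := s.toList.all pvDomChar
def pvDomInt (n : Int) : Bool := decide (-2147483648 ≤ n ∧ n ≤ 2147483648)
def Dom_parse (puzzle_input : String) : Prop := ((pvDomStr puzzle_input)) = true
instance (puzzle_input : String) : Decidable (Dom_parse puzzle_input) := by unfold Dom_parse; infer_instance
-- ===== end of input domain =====

-- B replaces A's single nested loop threading four accumulators with four independent passes over a flat cell list (more idiomatic decomposition, same cost).

-- ===== PORT A =====
-- one nested fold over enumerate(lines) / enumerate(line) threading the 4-tuple (entrance, passages, keys, doors)
def parse (puzzle_input : String) : (Int × Int) × (List (Int × Int)) × (List (String × Int × Int)) × (List (String × Int × Int)) :=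
  let st :=
    (PySem.List.enumerate ((PySem.Str.split? puzzle_input "\n").getD []) 0).foldl (fun st yl =>
      (PySem.List.enumerate yl.2.toList 0).foldl (fun st xc =>
        if xc.2 == '#' then st
        else
          let pos : Int × Int := (xc.1, yl.1)
          let st' := (st.1, PySem.Set.add st.2.1 pos, st.2.2.1, st.2.2.2)
          if xc.2 == '@' then (pos, st'.2.1, st'.2.2.1, st'.2.2.2)
          else if PySem.Chars.islower xc.2 then
            (st'.1, st'.2.1, (st'.2.2.1).insert (String.ofList [xc.2]) pos, st'.2.2.2)
          else if PySem.Chars.isupper xc.2 then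
            (st'.1, st'.2.1, st'.2.2.1, (st'.2.2.2).insert (String.ofList [xc.2]) pos)
          else st') st)
      (((-1 : Int), (-1 : Int)), (PySem.Set.empty : PySem.Set (Int × Int)),
       (PySem.Dict.empty : PySem.Dict String (Int × Int)), (PySem.Dict.empty : PySem.Dict String (Int × Int)))
  (st.1, st.2.1, st.2.2.1.items, st.2.2.2.items)

-- ===== PORT B =====
def parse_alt (puzzle_input : String) : (Int × Int) × (List (Int × Int)) × (List (String × Int × Int)) × (List (String × Int × Int)) :=
  let cells : List (Int × Int × Char) :=
    (PySem.List.enumerate ((PySem.Str.split? puzzle_input "\n").getD []) 0).flatMap (fun yl =>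
      (PySem.List.enumerate yl.2.toList 0).map (fun xc => (xc.1, yl.1, xc.2)))
  let passages : PySem.Set (Int × Int) :=
    PySem.Set.ofList ((cells.filter (fun c => !(c.2.2 == '#'))).map (fun c => (c.1, c.2.1)))
  -- a dict comprehension is repeated insert over the comprehension's (key, value) pairs
  let keys : PySem.Dict String (Int × Int) :=
    ((cells.filter (fun c => PySem.Chars.islower c.2.2)).map
      (fun c => (String.ofList [c.2.2], ((c.1 : Int), (c.2.1 : Int))))).foldl
      (fun d p => d.insert p.1 p.2) PySem.Dict.empty
  let doors : PySem.Dict String (Int × Int) :=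
    ((cells.filter (fun c => PySem.Chars.isupper c.2.2)).map
      (fun c => (String.ofList [c.2.2], ((c.1 : Int), (c.2.1 : Int))))).foldl
      (fun d p => d.insert p.1 p.2) PySem.Dict.empty
  let ats : List (Int × Int) := (cells.filter (fun c => c.2.2 == '@')).map (fun c => (c.1, c.2.1))
  let entrance : Int × Int := ats.getLastD ((-1 : Int), (-1 : Int))  -- ats[-1] if ats else Point(-1,-1)
  (entrance, passages, keys.items, doors.items)

-- ===== PRECONDITION & SPEC =====
def Spec_parse (puzzle_input : String) (out : (Int × Int) × (List (Int × Int)) × (List (String × Int × Int)) × (List (String × Int × Int))) : Prop := out = parse_alt puzzle_input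
instance (puzzle_input : String) (out : (Int × Int) × (List (Int × Int)) × (List (String × Int × Int)) × (List (String × Int × Int))) : Decidable (Spec_parse puzzle_input out) := by unfold Spec_parse; infer_instance

-- ===== CLAIM (what is proved, stated in full; the proofs are below) =====
def Claim_equal_parse : Prop := ∀ (puzzle_input : String), Dom_parse puzzle_input → Spec_parse puzzle_input (parse puzzle_input)

-- ===== LEMMAS AND PROOFS =====

-- A's loop body over one flat cell (x, y, ch), named so the fold can be reasoned about
def pvStep (st : (Int × Int) × PySem.Set (Int × Int) × PySem.Dict String (Int × Int) × PySem.Dict String (Int × Int))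
    (c : Int × Int × Char) :
    (Int × Int) × PySem.Set (Int × Int) × PySem.Dict String (Int × Int) × PySem.Dict String (Int × Int) :=
  if c.2.2 == '#' then st
  else
    let pos : Int × Int := (c.1, c.2.1)
    let st' := (st.1, PySem.Set.add st.2.1 pos, st.2.2.1, st.2.2.2)
    if c.2.2 == '@' then (pos, st'.2.1, st'.2.2.1, st'.2.2.2)
    else if PySem.Chars.islower c.2.2 then
      (st'.1, st'.2.1, (st'.2.2.1).insert (String.ofList [c.2.2]) pos, st'.2.2.2)
    else if PySem.Chars.isupper c.2.2 then
      (st'.1, st'.2.1, st'.2.2.1, (st'.2.2.2).insert (String.ofList [c.2.2]) pos)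
    else st'

theorem isupper_eq_false_of_islower (c : Char) (h : PySem.Chars.islower c = true) :
    PySem.Chars.isupper c = false := by
  by_contra hne
  have hu : PySem.Chars.isupper c = true := by
    cases hx : PySem.Chars.isupper c
    · exact absurd hx hne
    · rfl
  simp only [PySem.Chars.islower, Bool.and_eq_true, decide_eq_true_eq] at h
  simp only [PySem.Chars.isupper, Bool.and_eq_true, decide_eq_true_eq] at hu
  exact absurd (le_trans h.1 hu.2) (by decide)

-- the step acts on the four components independently
theorem pvStep_eq (st : (Int × Int) × PySem.Set (Int × Int) × PySem.Dict String (Int × Int) × PySem.Dict String (Int × Int))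
    (c : Int × Int × Char) :
    pvStep st c =
      ( if c.2.2 == '@' then ((c.1 : Int), (c.2.1 : Int)) else st.1,
        if !(c.2.2 == '#') then PySem.Set.add st.2.1 (c.1, c.2.1) else st.2.1,
        if PySem.Chars.islower c.2.2 then (st.2.2.1).insert (String.ofList [c.2.2]) (c.1, c.2.1) else st.2.2.1,
        if PySem.Chars.isupper c.2.2 then (st.2.2.2).insert (String.ofList [c.2.2]) (c.1, c.2.1) else st.2.2.2 ) := by
  obtain ⟨x, y, ch⟩ := c
  by_cases h1 : ch = '#'
  · subst h1
    simp [pvStep, (by decide : PySem.Chars.islower '#' = false), (by decide : PySem.Chars.isupper '#' = false)]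
  · by_cases h2 : ch = '@'
    · subst h2
      simp [pvStep, (by decide : PySem.Chars.islower '@' = false), (by decide : PySem.Chars.isupper '@' = false)]
    · by_cases h3 : PySem.Chars.islower ch = true
      · have h4 := isupper_eq_false_of_islower ch h3
        simp [pvStep, h1, h2, h3, h4]
      · by_cases h4 : PySem.Chars.isupper ch = true
        · simp [pvStep, h1, h2, h3, h4]
        · simp [pvStep, h1, h2, h3, h4]

theorem foldl_lastD {α β : Type} (p : α → Bool) (f : α → β) (l : List α) (e : β) :
    List.foldl (fun e c => if p c then f c else e) e l = ((l.filter p).map f).getLastD e := by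
  induction l generalizing e with
  | nil => rfl
  | cons a t ih =>
    simp only [List.foldl_cons]
    by_cases hp : p a
    · rw [if_pos hp, ih, List.filter_cons_of_pos hp, List.map_cons, List.getLastD_cons]
    · rw [if_neg hp, ih, List.filter_cons_of_neg hp]

-- the 4-accumulator fold is the tuple of four independent folds
theorem foldl_pvStep (cells : List (Int × Int × Char)) (e : Int × Int)
    (s : PySem.Set (Int × Int)) (kd dd : PySem.Dict String (Int × Int)) :
    List.foldl pvStep (e, s, kd, dd) cells =
      ( List.foldl (fun e (c : Int × Int × Char) => if c.2.2 == '@' then ((c.1 : Int), (c.2.1 : Int)) else e) e cells,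
        List.foldl (fun s (c : Int × Int × Char) => if !(c.2.2 == '#') then PySem.Set.add s (c.1, c.2.1) else s) s cells,
        List.foldl (fun d (c : Int × Int × Char) =>
          if PySem.Chars.islower c.2.2 then d.insert (String.ofList [c.2.2]) (c.1, c.2.1) else d) kd cells,
        List.foldl (fun d (c : Int × Int × Char) =>
          if PySem.Chars.isupper c.2.2 then d.insert (String.ofList [c.2.2]) (c.1, c.2.1) else d) dd cells ) := by
  induction cells generalizing e s kd dd with
  | nil => rfl
  | cons c rest ih =>
    simp only [List.foldl_cons, pvStep_eq]
    rw [ih]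

-- ===== VERDICT (by name: the statement is the Claim_ definition above) =====
theorem parse_spec : Claim_equal_parse := by
  intro puzzle_input _
  show parse puzzle_input = parse_alt puzzle_input
  have hA : parse puzzle_input =
      (let st := List.foldl pvStep
        (((-1 : Int), (-1 : Int)), (PySem.Set.empty : PySem.Set (Int × Int)),
         (PySem.Dict.empty : PySem.Dict String (Int × Int)), (PySem.Dict.empty : PySem.Dict String (Int × Int)))
        ((PySem.List.enumerate ((PySem.Str.split? puzzle_input "\n").getD []) 0).flatMap (fun yl =>
          (PySem.List.enumerate yl.2.toList 0).map (fun xc => (xc.1, yl.1, xc.2))))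
       (st.1, st.2.1, st.2.2.1.items, st.2.2.2.items)) := by
    rw [List.foldl_flatMap]
    simp only [List.foldl_map]
    rfl
  rw [hA]
  simp only [foldl_pvStep]
  unfold parse_alt
  simp only [foldl_lastD]
  simp only [PySem.Set.ofList_eq_foldl, List.foldl_map, PySem.List.foldl_if_eq_foldl_filter,
    PySem.Set.empty]
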